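-- pv_equiv track=rewrite | github.com/varunu28/A-Kata-A-Day | Python/Sum the Repeats.py | repeat_sum
-- ===== SOURCE A (Python) =====
-- def repeat_sum(l):
--
--     if len(l) <= 1:
--     	return 0
--
--     temp_full =[]
--     for temp in l:
--     	mid = []
--     	for i in temp:
--     		if i not in mid:
--     			mid.append(i)
--     	temp_full.append(mid)
--
--     full = []
--     for i in temp_full:
--     	for j in i:
--     		full.append(j)
--
--     sum_arr = []
--     for j in full:
--     	if full.count(j) > 1 and j not in sum_arr:
--     		sum_arr.append(j)
--
--     return sum(sum_arr)
-- ===== SOURCE B (Python) =====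
-- def repeat_sum(l):
--     # Union of all pairwise intersections of the sublist-sets; sum the resulting set.
--     def pair_repeats(sets):
--         if not sets:
--             return set()
--         first, rest = sets[0], sets[1:]
--         r = set()
--         for other in rest:
--             r |= first & other
--         return r | pair_repeats(rest)
--     return sum(pair_repeats([set(s) for s in l]))
-- ===== Notes on version B (the rewrite author's own statement) =====
-- stated objective: faster
-- what changed: Replaces A's flatten-then-count passes (full.count inside a loop, Theta(N^2) in the flattened length N) by a recursion over the sublist-sets that unions all pairwise intersections into one 'repeats' set and sums it; a value is summed iff it lies in at least two sublists, exactly A's count>1 criterion.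
import Mathlib
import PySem

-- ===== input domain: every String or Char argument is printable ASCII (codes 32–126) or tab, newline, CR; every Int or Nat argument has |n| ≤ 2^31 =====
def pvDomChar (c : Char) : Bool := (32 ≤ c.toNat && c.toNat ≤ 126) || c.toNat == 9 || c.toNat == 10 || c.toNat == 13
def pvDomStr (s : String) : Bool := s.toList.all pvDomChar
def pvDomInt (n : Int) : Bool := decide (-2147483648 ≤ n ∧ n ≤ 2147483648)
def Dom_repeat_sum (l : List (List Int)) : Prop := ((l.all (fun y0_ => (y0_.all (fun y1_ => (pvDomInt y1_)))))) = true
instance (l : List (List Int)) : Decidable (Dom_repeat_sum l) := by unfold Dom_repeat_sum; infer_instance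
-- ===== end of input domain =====

-- B builds the set of repeated values as the union of all pairwise intersections of the
-- sublist-sets (recursion over the list of sets) instead of A's flatten-and-count passes
-- (which run full.count inside a loop); measured faster; proved to return A's exact value.

-- ===== PORT A =====
def repeat_sum (l : List (List Int)) : Int :=
  if l.length ≤ 1 then 0
  else
    let temp_full : List (List Int) :=
      l.foldl (fun acc temp =>
        acc ++ [temp.foldl (fun mid i => if i ∈ mid then mid else mid ++ [i]) []]) []
    let full : List Int :=
      temp_full.foldl (fun acc i => i.foldl (fun a j => a ++ [j]) acc) []
    let sum_arr : List Int :=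
      full.foldl (fun acc j => if 1 < PySem.List.count full j ∧ j ∉ acc then acc ++ [j] else acc) []
    sum_arr.foldl (· + ·) 0

-- ===== PORT B =====
-- Source B's helper pair_repeats: recursion first :: rest, inner loop unioning first ∩ other.
def pairRepeats (sets : List (PySem.Set Int)) : PySem.Set Int :=
  match sets with
  | [] => PySem.Set.empty
  | first :: rest =>
    let r : PySem.Set Int :=
      rest.foldl (fun r other => PySem.Set.union r (PySem.Set.inter first other)) PySem.Set.empty
    PySem.Set.union r (pairRepeats rest)

def repeat_sum_alt (l : List (List Int)) : Int :=
  (pairRepeats (l.map PySem.Set.ofList)).foldl (· + ·) 0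

-- ===== PRECONDITION & SPEC =====
def Spec_repeat_sum (l : List (List Int)) (out : Int) : Prop := out = repeat_sum_alt l
instance (l : List (List Int)) (out : Int) : Decidable (Spec_repeat_sum l out) := by unfold Spec_repeat_sum; infer_instance

-- ===== CLAIM (what is proved, stated in full; the proofs are below) =====
def Claim_equal_repeat_sum : Prop := ∀ (l : List (List Int)), Dom_repeat_sum l → Spec_repeat_sum l (repeat_sum l)

-- ===== LEMMAS AND PROOFS =====

-- ---- A-side characterisation ----
theorem pv_dedup_snoc (ys : List Int) (a : Int) :
    PySem.List.dedup (ys ++ [a]) = if a ∈ ys then PySem.List.dedup ys else PySem.List.dedup ys ++ [a] := by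
  have h : PySem.List.dedup (ys ++ [a]) = PySem.Set.add (PySem.Set.ofList ys) a := by
    simp [PySem.List.dedup, PySem.Set.ofList]
  rw [h, PySem.Set.add]
  simp [PySem.Set.contains, PySem.Set.mem_ofList]

theorem pv_mid_fold (xs : List Int) : ∀ (ys : List Int),
    xs.foldl (fun mid i => if i ∈ mid then mid else mid ++ [i]) (PySem.List.dedup ys)
      = PySem.List.dedup (ys ++ xs) := by
  induction xs with
  | nil => intro ys; simp
  | cons a xs ih =>
    intro ys
    have hstep : (if a ∈ PySem.List.dedup ys then PySem.List.dedup ys else PySem.List.dedup ys ++ [a])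
        = PySem.List.dedup (ys ++ [a]) := by
      rw [pv_dedup_snoc]
      simp
    calc ((a :: xs).foldl (fun mid i => if i ∈ mid then mid else mid ++ [i]) (PySem.List.dedup ys))
        = xs.foldl (fun mid i => if i ∈ mid then mid else mid ++ [i]) (PySem.List.dedup (ys ++ [a])) := by
          simp only [List.foldl_cons]
          rw [hstep]
      _ = PySem.List.dedup ((ys ++ [a]) ++ xs) := ih (ys ++ [a])
      _ = PySem.List.dedup (ys ++ a :: xs) := by simp

theorem pv_append_map (l : List (List Int)) : ∀ (acc : List (List Int)),
    l.foldl (fun acc temp =>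
        acc ++ [temp.foldl (fun mid i => if i ∈ mid then mid else mid ++ [i]) []]) acc
      = acc ++ l.map PySem.List.dedup := by
  induction l with
  | nil => intro acc; simp
  | cons t l ih =>
    intro acc
    have h0 : (t.foldl (fun mid i => if i ∈ mid then mid else mid ++ [i]) ([] : List Int))
        = PySem.List.dedup t := by
      have := pv_mid_fold t []
      simpa using this
    simp [List.foldl_cons, h0, ih]

theorem pv_push (i : List Int) : ∀ (acc : List Int),
    i.foldl (fun a j => a ++ [j]) acc = acc ++ i := by
  induction i with
  | nil => intro acc; simp
  | cons x i ih => intro acc; simp [List.foldl_cons, ih]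

theorem pv_flatten (ls : List (List Int)) : ∀ (acc : List Int),
    ls.foldl (fun acc i => i.foldl (fun a j => a ++ [j]) acc) acc = acc ++ ls.flatten := by
  induction ls with
  | nil => intro acc; simp
  | cons i ls ih =>
    intro acc
    simp only [List.foldl_cons]
    rw [pv_push, ih]
    simp

theorem pv_sumarr (p : Int → Prop) [DecidablePred p] (xs : List Int) : ∀ (ys : List Int),
    xs.foldl (fun acc j => if p j ∧ j ∉ acc then acc ++ [j] else acc)
        ((PySem.List.dedup ys).filter (fun j => decide (p j)))
      = (PySem.List.dedup (ys ++ xs)).filter (fun j => decide (p j)) := by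
  induction xs with
  | nil => intro ys; simp
  | cons a xs ih =>
    intro ys
    have hmem : a ∈ (PySem.List.dedup ys).filter (fun j => decide (p j)) ↔ (a ∈ ys ∧ p a) := by
      simp [List.mem_filter]
    have hstep : (if p a ∧ a ∉ (PySem.List.dedup ys).filter (fun j => decide (p j))
          then (PySem.List.dedup ys).filter (fun j => decide (p j)) ++ [a]
          else (PySem.List.dedup ys).filter (fun j => decide (p j)))
        = (PySem.List.dedup (ys ++ [a])).filter (fun j => decide (p j)) := by
      rw [pv_dedup_snoc]
      by_cases hy : a ∈ ys
      · rw [if_pos hy, if_neg]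
        rintro ⟨hpa, hna⟩
        exact hna (hmem.mpr ⟨hy, hpa⟩)
      · rw [if_neg hy, List.filter_append]
        by_cases hpa : p a
        · rw [if_pos ⟨hpa, fun h => hy (hmem.mp h).1⟩]
          simp [hpa]
        · rw [if_neg (by rintro ⟨h, -⟩; exact hpa h)]
          simp [hpa]
    calc ((a :: xs).foldl (fun acc j => if p j ∧ j ∉ acc then acc ++ [j] else acc)
            ((PySem.List.dedup ys).filter (fun j => decide (p j))))
        = xs.foldl (fun acc j => if p j ∧ j ∉ acc then acc ++ [j] else acc)
            ((PySem.List.dedup (ys ++ [a])).filter (fun j => decide (p j))) := by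
          simp only [List.foldl_cons, hstep]
      _ = (PySem.List.dedup ((ys ++ [a]) ++ xs)).filter (fun j => decide (p j)) := ih (ys ++ [a])
      _ = (PySem.List.dedup (ys ++ a :: xs)).filter (fun j => decide (p j)) := by simp

-- count of x in the deduped flatten = number of sublists of l containing x
theorem pv_count_flatten (x : Int) (l : List (List Int)) :
    List.count x ((l.map PySem.List.dedup).flatten) = l.countP (fun s => decide (x ∈ s)) := by
  induction l with
  | nil => simp
  | cons s l ih =>
    simp only [List.map_cons, List.flatten_cons, List.count_append, List.countP_cons, ih]
    by_cases hx : x ∈ s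
    · have h1 : List.count x (PySem.Set.ofList s) = 1 :=
        List.count_eq_one_of_mem (PySem.Set.nodup_ofList s) ((PySem.Set.mem_ofList s x).mpr hx)
      simp [hx]
      omega
    · have h0 : List.count x (PySem.Set.ofList s) = 0 :=
        List.count_eq_zero_of_not_mem (fun h => hx ((PySem.Set.mem_ofList s x).mp h))
      simp [h0, hx]

-- ---- B-side characterisation ----
theorem pv_mem_fold_union (x : Int) (first : PySem.Set Int) (rest : List (PySem.Set Int)) :
    ∀ (r0 : PySem.Set Int),
      (x ∈ rest.foldl (fun r other => PySem.Set.union r (PySem.Set.inter first other)) r0)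
        ↔ x ∈ r0 ∨ (x ∈ first ∧ ∃ o ∈ rest, x ∈ o) := by
  induction rest with
  | nil => intro r0; simp
  | cons o rest ih =>
    intro r0
    simp only [List.foldl_cons, ih, PySem.Set.mem_union, PySem.Set.mem_inter, List.mem_cons]
    constructor
    · rintro (((h | ⟨hf, ho⟩) ) | ⟨hf, o', ho', hx⟩)
      · exact Or.inl h
      · exact Or.inr ⟨hf, o, Or.inl rfl, ho⟩
      · exact Or.inr ⟨hf, o', Or.inr ho', hx⟩
    · rintro (h | ⟨hf, o', (rfl | ho'), hx⟩)
      · exact Or.inl (Or.inl h)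
      · exact Or.inl (Or.inr ⟨hf, hx⟩)
      · exact Or.inr ⟨hf, o', ho', hx⟩

theorem pv_nodup_fold_union (first : PySem.Set Int) (rest : List (PySem.Set Int)) :
    ∀ (r0 : PySem.Set Int), r0.Nodup →
      (rest.foldl (fun r other => PySem.Set.union r (PySem.Set.inter first other)) r0).Nodup := by
  induction rest with
  | nil => intro r0 h; simpa using h
  | cons o rest ih =>
    intro r0 h
    simp only [List.foldl_cons]
    exact ih _ (PySem.Set.nodup_union _ _ h)

theorem pv_nodup_pairRepeats (sets : List (PySem.Set Int)) : (pairRepeats sets).Nodup := by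
  induction sets with
  | nil => simp [pairRepeats, PySem.Set.empty]
  | cons first rest ih =>
    simp only [pairRepeats]
    exact PySem.Set.nodup_union _ _
      (pv_nodup_fold_union first rest PySem.Set.empty (by simp [PySem.Set.empty]))

theorem pv_mem_pairRepeats (x : Int) (sets : List (PySem.Set Int)) :
    x ∈ pairRepeats sets ↔ 2 ≤ sets.countP (fun s => decide (x ∈ s)) := by
  induction sets with
  | nil => simp [pairRepeats, PySem.Set.empty]
  | cons first rest ih =>
    have hempty : (x ∈ (PySem.Set.empty : PySem.Set Int)) ↔ False := by
      simp [PySem.Set.empty]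
    have hpos : (∃ o ∈ rest, x ∈ o) ↔ 0 < rest.countP (fun s => decide (x ∈ s)) := by
      rw [List.countP_pos_iff]
      simp
    simp only [pairRepeats, PySem.Set.mem_union, pv_mem_fold_union, List.countP_cons, ih,
      hempty, hpos, false_or]
    by_cases hf : x ∈ first
    · simp only [hf, decide_true, if_true, true_and]
      omega
    · simp [hf]

-- membership in the countP does not depend on going through Set.ofList
theorem pv_countP_map (x : Int) (l : List (List Int)) :
    (l.map PySem.Set.ofList).countP (fun s => decide (x ∈ s)) = l.countP (fun s => decide (x ∈ s)) := by
  rw [List.countP_map]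
  apply List.countP_congr
  intro s _
  simp [Function.comp, PySem.Set.mem_ofList]

theorem pv_sum_foldl (xs : List Int) : xs.foldl (· + ·) 0 = xs.sum := by
  have := PySem.List.foldl_add (l := xs) (a := 0) (g := fun x => x)
  simpa using this

-- B's repeats list is a permutation of A's sum_arr in the main case
theorem pv_perm (l : List (List Int)) :
    ((PySem.List.dedup ((l.map PySem.List.dedup).flatten)).filter
        (fun j => decide (1 < PySem.List.count ((l.map PySem.List.dedup).flatten) j))).Perm
      (pairRepeats (l.map PySem.Set.ofList)) := by
  rw [List.perm_ext_iff_of_nodup (List.Nodup.filter _ (PySem.List.nodup_dedup _)) (pv_nodup_pairRepeats _)]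
  intro x
  rw [pv_mem_pairRepeats, pv_countP_map]
  simp only [List.mem_filter, PySem.List.mem_dedup, PySem.List.count_eq, decide_eq_true_eq]
  rw [pv_count_flatten]
  constructor
  · rintro ⟨-, h⟩
    omega
  · intro h
    refine ⟨?_, by omega⟩
    have hpos : 0 < List.count x ((l.map PySem.List.dedup).flatten) := by
      rw [pv_count_flatten]; omega
    exact List.count_pos_iff.mp hpos

-- ===== VERDICT (by name: the statement is the Claim_ definition above) =====
theorem repeat_sum_spec : Claim_equal_repeat_sum := by
  intro l _
  unfold Spec_repeat_sum repeat_sum_alt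
  by_cases hlen : l.length ≤ 1
  · have hA : repeat_sum l = 0 := by simp only [repeat_sum]; rw [if_pos hlen]
    have hempty : pairRepeats (l.map PySem.Set.ofList) = [] := by
      apply List.eq_nil_iff_forall_not_mem.mpr
      intro x hx
      have h := (pv_mem_pairRepeats x _).mp hx
      have hle := List.countP_le_length (l := l.map PySem.Set.ofList) (p := fun s => decide (x ∈ s))
      simp only [List.length_map] at hle
      omega
    rw [hA, hempty]
    rfl
  · simp only [repeat_sum]
    rw [if_neg hlen, pv_append_map, List.nil_append, pv_flatten, List.nil_append]
    have hsum := pv_sumarr (fun j => 1 < PySem.List.count ((l.map PySem.List.dedup).flatten) j)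
      ((l.map PySem.List.dedup).flatten) []
    simp only [List.nil_append] at hsum
    rw [show (PySem.List.dedup ([] : List Int)) = [] from rfl] at hsum
    simp only [List.filter_nil] at hsum
    rw [hsum, pv_sum_foldl, pv_sum_foldl]
    exact (pv_perm l).sum_eq
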